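-- pv_equiv track=rewrite | github.com/FnSK4R17s/commandclaw | temp/sprites/gen_cat_mascot.py | merge_row
-- ===== SOURCE A (Python) =====
-- def merge_row(cells):
--     segs = []
--     fg, bg, text = cells[0]
--     for f, b, ch in cells[1:]:
--         if f == fg and b == bg:
--             text += ch
--         else:
--             segs.append((fg, bg, text))
--             fg, bg, text = f, b, ch
--     segs.append((fg, bg, text))
--     return segs
-- ===== SOURCE B (Python) =====
-- def merge_row(cells):
--     f, b, ch = cells[0]
--     rest = merge_row(cells[1:]) if len(cells) > 1 else []
--     if rest and rest[0][0] == f and rest[0][1] == b: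
--         return [(f, b, ch + rest[0][2])] + rest[1:]
--     return [(f, b, ch)] + rest
-- ===== Notes on version B (the rewrite author's own statement) =====
-- stated objective: alternative
-- what changed: A scans forward keeping a running (fg,bg,text) accumulator and appends finished segments; B recurses on the tail and merges the head cell into the front of the recursive result, building the output back-to-front with no running state.
import Mathlib
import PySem

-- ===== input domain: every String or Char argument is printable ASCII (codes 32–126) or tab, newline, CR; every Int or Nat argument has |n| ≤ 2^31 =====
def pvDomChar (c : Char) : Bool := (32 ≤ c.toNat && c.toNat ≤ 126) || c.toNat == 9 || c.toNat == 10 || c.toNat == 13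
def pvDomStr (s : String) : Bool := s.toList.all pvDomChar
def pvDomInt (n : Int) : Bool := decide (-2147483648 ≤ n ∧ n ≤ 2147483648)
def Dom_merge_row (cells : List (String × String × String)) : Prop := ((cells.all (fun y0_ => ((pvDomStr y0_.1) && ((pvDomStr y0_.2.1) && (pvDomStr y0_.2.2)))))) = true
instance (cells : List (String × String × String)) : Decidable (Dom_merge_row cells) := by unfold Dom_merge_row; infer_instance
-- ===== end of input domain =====

-- B builds the merged row by recursion on the tail, merging the head cell into the
-- front of the recursive result (back-to-front), instead of A's forward loop with a
-- running (fg,bg,text) accumulator; same cost, different decomposition.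

-- ===== PORT A =====
-- A's loop state: (fg, bg, text, segs); each step either extends text or flushes a segment.
def mergeRowStep (st : String × String × String × List (String × String × String))
    (c : String × String × String) : String × String × String × List (String × String × String) :=
  let (fg, bg, text, segs) := st
  let (f, b, ch) := c
  if f == fg && b == bg then (fg, bg, text ++ ch, segs)
  else (f, b, ch, segs ++ [(fg, bg, text)])

def merge_row (cells : List (String × String × String)) : List (String × String × String) :=
  match cells with
  | [] => []   -- unreachable: Pre_merge_row excludes [], where Python A raises IndexError
  | (fg, bg, text) :: rest =>
    let (fg, bg, text, segs) := rest.foldl mergeRowStep (fg, bg, text, [])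
    segs ++ [(fg, bg, text)]

-- ===== PORT B =====
-- merge one head cell into the front of an already-merged rest
def mrCons (f b ch : String) (r : List (String × String × String)) : List (String × String × String) :=
  match r with
  | (f', b', t') :: rs => if f' == f && b' == b then (f, b, ch ++ t') :: rs else (f, b, ch) :: (f', b', t') :: rs
  | [] => [(f, b, ch)]

def merge_row_alt (cells : List (String × String × String)) : List (String × String × String) :=
  match cells with
  | [] => []   -- unreachable: Pre_merge_row excludes [], where Python B raises IndexError
  | (f, b, ch) :: rest => mrCons f b ch (merge_row_alt rest)

-- ===== PRECONDITION & SPEC =====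
-- Pre_ excludes only the empty list, on which both Pythons raise IndexError (cells[0]).
def Pre_merge_row (cells : List (String × String × String)) : Prop := cells ≠ []
instance (cells : List (String × String × String)) : Decidable (Pre_merge_row cells) := by unfold Pre_merge_row; infer_instance
def pvWitness_merge_row : (List (String × String × String)) := [("a", "b", "x")]

def Spec_merge_row (cells : List (String × String × String)) (out : List (String × String × String)) : Prop := out = merge_row_alt cells
instance (cells : List (String × String × String)) (out : List (String × String × String)) : Decidable (Spec_merge_row cells out) := by unfold Spec_merge_row; infer_instance

-- ===== CLAIM (what is proved, stated in full; the proofs are below) =====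
def Claim_equal_merge_row : Prop := ∀ (cells : List (String × String × String)), Dom_merge_row cells → Pre_merge_row cells → Spec_merge_row cells (merge_row cells)

-- ===== LEMMAS AND PROOFS =====

-- mrCons always puts (f, b, ·) at the head
theorem mrCons_head (f b ch : String) (r : List (String × String × String)) :
    ∃ t rs, mrCons f b ch r = (f, b, t) :: rs := by
  match r with
  | [] => exact ⟨ch, [], rfl⟩
  | (f', b', t') :: rs =>
    cases hx : (f' == f && b' == b)
    · exact ⟨ch, (f', b', t') :: rs, by simp [mrCons, hx]⟩
    · exact ⟨ch ++ t', rs, by simp [mrCons, hx]⟩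

-- merging two cells of equal colors one at a time equals merging their concatenation
theorem mrCons_merge (fg bg text ch : String) (r : List (String × String × String)) :
    mrCons fg bg (text ++ ch) r = mrCons fg bg text (mrCons fg bg ch r) := by
  unfold mrCons
  match r with
  | [] => simp
  | (f', b', t') :: rs =>
    cases hx : (f' == fg && b' == bg)
    · simp [hx]
    · simp [hx, String.append_assoc]

-- loop invariant: A's fold from state (fg,bg,text,segs), finished by flushing,
-- equals segs followed by B's merge of (fg,bg,text) into the merged rest
theorem fold_eq_mrCons (rest : List (String × String × String))
    (fg bg text : String) (segs : List (String × String × String)) :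
    (rest.foldl mergeRowStep (fg, bg, text, segs)).2.2.2
      ++ [((rest.foldl mergeRowStep (fg, bg, text, segs)).1,
           (rest.foldl mergeRowStep (fg, bg, text, segs)).2.1,
           (rest.foldl mergeRowStep (fg, bg, text, segs)).2.2.1)]
    = segs ++ mrCons fg bg text (merge_row_alt rest) := by
  induction rest generalizing fg bg text segs with
  | nil => simp [merge_row_alt, mrCons]
  | cons c rs ih =>
    obtain ⟨f, b, ch⟩ := c
    simp only [List.foldl_cons, mergeRowStep]
    cases hx : (f == fg && b == bg)
    · simp only [Bool.false_eq_true, if_false]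
      rw [ih]
      obtain ⟨t, rs', hhead⟩ := mrCons_head f b ch (merge_row_alt rs)
      have h2 : mrCons fg bg text (merge_row_alt ((f, b, ch) :: rs))
              = (fg, bg, text) :: mrCons f b ch (merge_row_alt rs) := by
        show mrCons fg bg text (mrCons f b ch (merge_row_alt rs)) = _
        rw [hhead]; simp [mrCons, hx]
      rw [h2]
      simp
    · simp only [if_true]
      rw [ih]
      simp only [Bool.and_eq_true, beq_iff_eq] at hx
      obtain ⟨hf, hb⟩ := hx
      subst hf hb
      rw [mrCons_merge]
      simp [merge_row_alt]

-- ===== VERDICT (by name: the statement is the Claim_ definition above) =====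
theorem merge_row_spec : Claim_equal_merge_row := by
  intro cells _ hpre
  unfold Spec_merge_row
  match cells with
  | [] => exact absurd rfl hpre
  | (fg, bg, text) :: rest =>
    show merge_row ((fg, bg, text) :: rest) = _
    simp only [merge_row]
    rcases hst : rest.foldl mergeRowStep (fg, bg, text, []) with ⟨a, b, c, d⟩
    have := fold_eq_mrCons rest fg bg text []
    rw [hst] at this
    simpa [merge_row_alt] using this
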